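-- pv_equiv track=rewrite | github.com/EnspikondPlus/neophytic-rooms-green | benchmarks/room_gen.py | _generate_binary_tree
-- ===== SOURCE A (Python) =====
-- import collections
--
-- def _generate_binary_tree(num_rooms: int) -> dict[int, list[int]]:
--     """
--     Strict binary-tree construction.  Each node may have at most 2 children.
--     Nodes are assigned as children in BFS order (level by level, left to right).
--     Result: a connected, cycle-free graph where every node has degree <= 3
--     (<=2 children + 1 parent; root has no parent so degree <= 2).
--     """
--     adj: dict[int, list[int]] = {i: [] for i in range(num_rooms)}
--     parent_queue: collections.deque[tuple[int, int]] = collections.deque([(0, 2)])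
--
--     for i in range(1, num_rooms):
--         if not parent_queue:
--             break
--         parent, slots = parent_queue[0]
--         adj[parent].append(i)
--         adj[i].append(parent)
--         slots -= 1
--         if slots == 0:
--             parent_queue.popleft()
--         else:
--             parent_queue[0] = (parent, slots)
--         parent_queue.append((i, 2))
--
--     return adj
-- ===== SOURCE B (Python) =====
-- def _generate_binary_tree(num_rooms: int) -> dict[int, list[int]]:
--     """Closed-form version: node i's parent in the BFS-filled binary tree is (i-1)//2."""
--     adj: dict[int, list[int]] = {i: [] for i in range(num_rooms)}
--     for i in range(1, num_rooms):
--         parent = (i - 1) // 2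
--         adj[parent].append(i)
--         adj[i].append(parent)
--     return adj
-- ===== Notes on version B (the rewrite author's own statement) =====
-- stated objective: simpler
-- what changed: Replaced the deque-based BFS slot bookkeeping (queue of parent/remaining-slots pairs with pop, requeue and break) with a direct closed-form computation of each node's parent index in a single plain loop.
import Mathlib
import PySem

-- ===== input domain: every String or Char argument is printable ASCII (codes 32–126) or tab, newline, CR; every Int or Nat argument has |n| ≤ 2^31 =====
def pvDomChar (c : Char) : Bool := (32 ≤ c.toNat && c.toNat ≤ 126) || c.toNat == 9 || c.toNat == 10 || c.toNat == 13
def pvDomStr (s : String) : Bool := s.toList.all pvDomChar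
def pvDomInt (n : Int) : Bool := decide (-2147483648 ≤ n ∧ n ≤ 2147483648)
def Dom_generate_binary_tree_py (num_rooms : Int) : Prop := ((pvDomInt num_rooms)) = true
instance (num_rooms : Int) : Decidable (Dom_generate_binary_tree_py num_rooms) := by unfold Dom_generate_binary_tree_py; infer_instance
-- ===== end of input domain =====

-- B drops A's deque/slot bookkeeping and computes each node's parent in closed form ((i-1)//2); simpler, same O(n) cost.
-- ===== PORT A =====
-- the for-loop with its 'break': recursion over the list of indices i, carrying (adj, parent_queue)
def pvALoop (adj : PySem.Dict Int (List Int)) (q : List (Int × Int)) : List Int → PySem.Dict Int (List Int)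
  | [] => adj
  | i :: rest =>
    match q with
    | [] => adj  -- 'if not parent_queue: break'
    | (parent, slots) :: qtail =>
      let adj := adj.modify parent [] (fun l => l ++ [i])
      let adj := adj.modify i [] (fun l => l ++ [parent])
      let slots := slots - 1
      let q := if slots = 0 then qtail else (parent, slots) :: qtail
      pvALoop adj (q ++ [(i, 2)]) rest

def generate_binary_tree_py (num_rooms : Int) : List (Int × List Int) :=
  let adj : PySem.Dict Int (List Int) :=
    (PySem.List.pyRange 0 num_rooms 1).foldl (fun d i => d.insert i []) PySem.Dict.empty
  (pvALoop adj [(0, 2)] (PySem.List.pyRange 1 num_rooms 1)).items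

-- ===== PORT B =====
def pvBStep (d : PySem.Dict Int (List Int)) (i : Int) : PySem.Dict Int (List Int) :=
  let parent := PySem.Int.floordiv (i - 1) 2
  ((d.modify parent [] (fun l => l ++ [i])).modify i [] (fun l => l ++ [parent]))

def generate_binary_tree_py_alt (num_rooms : Int) : List (Int × List Int) :=
  let adj : PySem.Dict Int (List Int) :=
    (PySem.List.pyRange 0 num_rooms 1).foldl (fun d i => d.insert i []) PySem.Dict.empty
  ((PySem.List.pyRange 1 num_rooms 1).foldl pvBStep adj).items

-- ===== PRECONDITION & SPEC =====
def Spec_generate_binary_tree_py (num_rooms : Int) (out : List (Int × List Int)) : Prop := out = generate_binary_tree_py_alt num_rooms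
instance (num_rooms : Int) (out : List (Int × List Int)) : Decidable (Spec_generate_binary_tree_py num_rooms out) := by unfold Spec_generate_binary_tree_py; infer_instance

-- ===== CLAIM (what is proved, stated in full; the proofs are below) =====
def Claim_equal_generate_binary_tree_py : Prop := ∀ (num_rooms : Int), Dom_generate_binary_tree_py num_rooms → Spec_generate_binary_tree_py num_rooms (generate_binary_tree_py num_rooms)

-- ===== LEMMAS AND PROOFS =====

-- ===== VERDICT (by name: the statement is the Claim_ definition above) =====
-- queue contents after nodes 1..t have been assigned (front = node t+1's parent with its remaining slots)
def pvQueueSpec (t : Nat) : List (Int × Int) :=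
  (((t / 2 : Nat) : Int), if t % 2 = 0 then 2 else 1) ::
    (List.range (t - t / 2)).map (fun j => (((t / 2 + 1 + j : Nat) : Int), 2))

-- consecutive indices t+1, t+2, …, t+m as Ints
def pvIdx (s m : Nat) : List Int := (List.range m).map (fun j => ((s + j : Nat) : Int))

lemma pvIdx_cons (s m : Nat) : pvIdx s (m + 1) = ((s : Nat) : Int) :: pvIdx (s + 1) m := by
  simp [pvIdx, List.range_succ_eq_map, List.map_map, Function.comp]
  intro a _
  omega

lemma pvShift (a : Int) (m : Nat) :
    (List.range m).map (fun j : Nat => ((a + (j : Int)), (2 : Int))) ++ [((a + (m : Int)), 2)] =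
    ((a, 2) : Int × Int) :: (List.range m).map (fun j : Nat => ((a + 1 + (j : Int)), 2)) := by
  have h : ((a, 2) : Int × Int) :: (List.range m).map (fun j : Nat => ((a + 1 + (j : Int)), (2 : Int))) =
      (List.range (m + 1)).map (fun j : Nat => ((a + (j : Int)), (2 : Int))) := by
    rw [List.range_succ_eq_map, List.map_cons, List.map_map]
    simp
    intro j _
    ring
  rw [h, List.range_succ, List.map_append]
  simp

lemma pvQueueSpec_step (t : Nat) :
    ((if ((if t % 2 = 0 then (2:Int) else 1) - 1) = 0 then
        (List.range (t - t / 2)).map (fun j => (((t / 2 + 1 + j : Nat) : Int), (2:Int)))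
      else (((t / 2 : Nat) : Int), (if t % 2 = 0 then (2:Int) else 1) - 1) ::
        (List.range (t - t / 2)).map (fun j => (((t / 2 + 1 + j : Nat) : Int), 2)))
      ++ [(((t + 1 : Nat) : Int), 2)]) = pvQueueSpec (t + 1) := by
  rcases Nat.even_or_odd t with ⟨k, hk⟩ | ⟨k, hk⟩
  · subst hk
    have h2 : (k + k) % 2 = 0 := by omega
    have hd : (k + k) / 2 = k := by omega
    have hd' : (k + k + 1) / 2 = k := by omega
    have hm : (k + k + 1) % 2 = 1 := by omega
    have hlen : k + k + 1 - k = k + 1 := by omega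
    simp [pvQueueSpec, h2, hd, hd', hm, hlen, List.range_succ]
    ring
  · subst hk
    have h2 : (2 * k + 1) % 2 = 1 := by omega
    have hd : (2 * k + 1) / 2 = k := by omega
    have hd' : (2 * k + 1 + 1) / 2 = k + 1 := by omega
    have hm : (2 * k + 1 + 1) % 2 = 0 := by omega
    have hlen : 2 * k + 1 - k = k + 1 := by omega
    simp only [pvQueueSpec, h2, hd, hd', hm, hlen]
    norm_num
    have h := pvShift ((k : Int) + 1) (k + 1)
    push_cast at h ⊢
    ring_nf at h ⊢
    rw [show 1 + k * 2 - k = 1 + k from by omega]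
    exact h

lemma pvALoop_eq_fold (m : Nat) : ∀ (t : Nat) (adj : PySem.Dict Int (List Int)),
    pvALoop adj (pvQueueSpec t) (pvIdx (t + 1) m) = (pvIdx (t + 1) m).foldl pvBStep adj := by
  induction m with
  | zero => intro t adj; simp [pvIdx, pvALoop]
  | succ m ih =>
    intro t adj
    rw [pvIdx_cons]
    have hpar : PySem.Int.floordiv (((t + 1 : Nat) : Int) - 1) 2 = ((t / 2 : Nat) : Int) := by
      have : (((t + 1 : Nat) : Int) - 1) = ((t : Nat) : Int) := by push_cast; ring
      rw [this]
      exact_mod_cast PySem.Int.floordiv_natCast t 2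
    simp only [pvALoop, pvQueueSpec, List.foldl_cons, pvBStep, hpar]
    rw [pvQueueSpec_step t]
    have := ih (t + 1) ((adj.modify ((t / 2 : Nat) : Int) [] (fun l => l ++ [((t + 1 : Nat) : Int)])).modify
      ((t + 1 : Nat) : Int) [] (fun l => l ++ [((t / 2 : Nat) : Int)]))
    simpa using this

lemma pvRange_eq_idx (n : Int) : PySem.List.pyRange 1 n 1 = pvIdx 1 (n - 1).toNat := by
  rw [PySem.List.pyRange_one]
  simp [pvIdx]

-- ===== VERDICT (by name: the statement is the Claim_ definition above) =====
theorem generate_binary_tree_py_spec : Claim_equal_generate_binary_tree_py := by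
  intro n _
  unfold Spec_generate_binary_tree_py generate_binary_tree_py generate_binary_tree_py_alt
  rw [pvRange_eq_idx]
  have h := pvALoop_eq_fold (n - 1).toNat 0
    ((PySem.List.pyRange 0 n 1).foldl (fun d i => d.insert i []) PySem.Dict.empty)
  have hq : pvQueueSpec 0 = [(0, 2)] := by decide
  rw [hq] at h
  simp only [h]
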